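-- pv_equiv track=rewrite | github.com/Time0o/advent-of-code | 2015/day01/day01.py | final_floor
-- ===== SOURCE A (Python) =====
-- def final_floor(instr: str) -> int:
--     res = 0
--     for c in instr:
--         if c == '(':
--             res += 1
--         elif c == ')':
--             res -= 1
--         else:
--             raise ValueError('invalid character')
--
--     return res
-- ===== SOURCE B (Python) =====
-- def final_floor(instr: str) -> int:
--     opens = instr.count('(')
--     closes = instr.count(')')
--     if opens + closes != len(instr):
--         raise ValueError('invalid character')
--     return opens - closes
-- ===== Notes on version B (the rewrite author's own statement) =====
-- stated objective: simpler
-- what changed: Replaces the per-character if/elif/else accumulation loop with two substring-count scans (str.count of each paren) plus a length-based validity check, returning the difference of the two counts.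
import Mathlib
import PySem

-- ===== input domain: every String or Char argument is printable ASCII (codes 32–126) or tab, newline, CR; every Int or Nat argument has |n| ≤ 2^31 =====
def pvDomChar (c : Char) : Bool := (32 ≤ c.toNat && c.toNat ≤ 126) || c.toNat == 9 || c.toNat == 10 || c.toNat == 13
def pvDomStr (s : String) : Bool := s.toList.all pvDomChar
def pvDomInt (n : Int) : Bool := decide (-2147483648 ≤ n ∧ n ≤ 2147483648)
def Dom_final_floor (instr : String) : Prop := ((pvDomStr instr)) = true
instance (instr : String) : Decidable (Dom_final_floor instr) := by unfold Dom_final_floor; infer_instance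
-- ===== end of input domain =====

-- B replaces A's per-character if/elif/else loop with two str.count scans and a
-- length-based validity check (same ValueError); objective: simpler.

-- ===== PORT A =====
-- the else-branch raises ValueError in Python; those inputs are excluded by Pre_,
-- (the port's else-value is never reached under Pre_)
def final_floor (instr : String) : Int :=
  instr.toList.foldl
    (fun res c => if c = '(' then res + 1 else if c = ')' then res - 1 else res) 0

-- ===== PORT B =====
-- the `opens + closes != len(instr)` ValueError fires exactly off Pre_; under Pre_
-- B returns opens - closes
def final_floor_alt (instr : String) : Int :=
  let opens := PySem.Str.count instr "("
  let closes := PySem.Str.count instr ")"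
  (opens : Int) - (closes : Int)

-- ===== PRECONDITION & SPEC =====
-- Pre_ excludes exactly the inputs containing a character that is not a paren,
-- on which the Python A raises ValueError (B raises the same ValueError).
def Pre_final_floor (instr : String) : Prop :=
  (instr.toList.all fun c => c == '(' || c == ')') = true
instance (instr : String) : Decidable (Pre_final_floor instr) := by
  unfold Pre_final_floor; infer_instance

def pvWitness_final_floor : String := "(())("

def Spec_final_floor (instr : String) (out : Int) : Prop := out = final_floor_alt instr
instance (instr : String) (out : Int) : Decidable (Spec_final_floor instr out) := by
  unfold Spec_final_floor; infer_instance

-- ===== CLAIM (what is proved, stated in full; the proofs are below) =====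
def Claim_equal_final_floor : Prop :=
  ∀ (instr : String), Dom_final_floor instr → Pre_final_floor instr →
    Spec_final_floor instr (final_floor instr)

-- ===== LEMMAS AND PROOFS =====

-- Chars.count.go on a single-character needle counts occurrences of that character
lemma count_go_singleton (c : Char) :
    ∀ (fuel : Nat) (s : List Char) (acc : Nat), s.length ≤ fuel →
      PySem.Chars.count.go [c] fuel s acc = acc + s.count c := by
  intro fuel
  induction fuel with
  | zero =>
    intro s acc h
    have : s = [] := List.eq_nil_of_length_eq_zero (Nat.le_zero.mp h)
    subst this
    simp [PySem.Chars.count.go]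
  | succ n ih =>
    intro s acc h
    cases s with
    | nil => simp [PySem.Chars.count.go]
    | cons hd tl =>
      simp only [PySem.Chars.count.go]
      by_cases hc : hd = c
      · subst hc
        have hp : List.isPrefixOf [hd] (hd :: tl) = true := by
          simp [List.isPrefixOf]
        rw [if_pos hp]
        simp only [List.length_cons] at h
        simp only [List.length_nil, List.length_cons, List.drop_succ_cons, List.drop_zero]
        rw [ih _ _ (Nat.le_of_succ_le_succ h)]
        simp
        omega
      · have hp : List.isPrefixOf [c] (hd :: tl) = false := by
          simp [List.isPrefixOf]
          exact fun h' => hc h'.symm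
        rw [if_neg (by simp [hp])]
        simp only [List.length_cons] at h
        rw [ih _ _ (Nat.le_of_succ_le_succ h)]
        simp [hc]

lemma count_singleton (s : List Char) (c : Char) :
    PySem.Chars.count s [c] = s.count c := by
  rw [PySem.Chars.count]
  simp only [List.isEmpty_cons, Bool.false_eq_true, if_false]
  rw [count_go_singleton c s.length s 0 le_rfl]
  simp

-- A's loop, on a list of only '(' / ')', computes acc + #'(' - #')'
lemma foldl_paren (l : List Char) :
    ∀ acc : Int, (∀ c ∈ l, c = '(' ∨ c = ')') →
      l.foldl (fun res c => if c = '(' then res + 1 else if c = ')' then res - 1 else res) acc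
        = acc + (l.count '(' : Int) - (l.count ')' : Int) := by
  induction l with
  | nil => intro acc _; simp
  | cons hd tl ih =>
    intro acc hv
    have htl : ∀ c ∈ tl, c = '(' ∨ c = ')' := fun c hc => hv c (List.mem_cons_of_mem _ hc)
    rcases hv hd (List.mem_cons_self ..) with h | h <;> subst h <;>
      simp only [List.foldl_cons, List.count_cons] <;>
      norm_num [fun a : ℤ => ih a htl] <;> push_cast <;> ring

-- ===== VERDICT (by name: the statement is the Claim_ definition above) =====
theorem final_floor_spec : Claim_equal_final_floor := by
  intro instr _ hpre
  have hv : ∀ c ∈ instr.toList, c = '(' ∨ c = ')' := by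
    intro c hc
    simpa using List.all_eq_true.mp hpre c hc
  unfold Spec_final_floor final_floor final_floor_alt
  rw [PySem.Str.count_eq, PySem.Str.count_eq]
  show _ = (PySem.Chars.count instr.toList ['('] : Int) - (PySem.Chars.count instr.toList [')'] : Int)
  rw [count_singleton, count_singleton, foldl_paren _ 0 hv]
  simp
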